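-- pv_equiv track=rewrite | github.com/alandra-v/mcp-acp-nexus | scripts/parse_latency_logs.py | group_by_decision
-- ===== SOURCE A (Python) =====
-- def group_by_decision(
--     entries: list[dict],
-- ) -> dict[str, list[dict]]:
--     """Split entries by decision type (allow / deny / hitl)."""
--     groups: dict[str, list[dict]] = {}
--     for entry in entries:
--         key = (entry.get("decision") or "unknown").lower()
--         groups.setdefault(key, []).append(entry)
--     return groups
-- ===== SOURCE B (Python) =====
-- def group_by_decision(
--     entries: list[dict],
-- ) -> dict[str, list[dict]]:
--     """Split entries by decision type (allow / deny / hitl)."""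
--     def key(e):
--         return (e.get("decision") or "unknown").lower()
--     ordered_keys = list(dict.fromkeys(key(e) for e in entries))
--     return {k: [e for e in entries if key(e) == k] for k in ordered_keys}
-- ===== Notes on version B (the rewrite author's own statement) =====
-- stated objective: alternative
-- what changed: Replaces the single-pass setdefault/append dict accumulation with a two-pass scheme: first collect the distinct lower-cased decision keys in first-occurrence order, then build the result by filtering the entry list once per key.
import Mathlib
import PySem

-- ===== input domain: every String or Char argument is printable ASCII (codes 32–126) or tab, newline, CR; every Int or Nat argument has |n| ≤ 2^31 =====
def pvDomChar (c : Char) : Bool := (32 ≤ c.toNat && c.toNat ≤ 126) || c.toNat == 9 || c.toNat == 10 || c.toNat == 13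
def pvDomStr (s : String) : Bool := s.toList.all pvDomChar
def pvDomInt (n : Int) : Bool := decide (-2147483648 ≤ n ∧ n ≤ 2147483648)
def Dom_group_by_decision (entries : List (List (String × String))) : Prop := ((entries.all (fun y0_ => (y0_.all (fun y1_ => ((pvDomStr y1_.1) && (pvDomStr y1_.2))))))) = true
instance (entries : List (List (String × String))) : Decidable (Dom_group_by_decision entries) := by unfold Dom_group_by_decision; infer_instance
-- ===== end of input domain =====

-- B keeps A's behaviour exactly; it trades the one-pass setdefault/append accumulation for
-- dedup-keys-then-filter-per-key (objective: alternative, not faster).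

-- ===== PORT A =====
-- (entry.get("decision") or "unknown").lower() — shared by both Pythons verbatim
def pvKey (e : List (String × String)) : String :=
  PySem.Str.lower
    (match (PySem.Dict.mk e).get? "decision" with
     | none => "unknown"
     | some v => if v = "" then "unknown" else v)

def group_by_decision (entries : List (List (String × String))) : List (String × List (List (String × String))) :=
  (entries.foldl
    (fun g e => g.modify (pvKey e) [] (fun v => v ++ [e]))
    PySem.Dict.empty).items

-- ===== PORT B =====
def group_by_decision_alt (entries : List (List (String × String))) : List (String × List (List (String × String))) :=
  (PySem.List.dedup (entries.map pvKey)).map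
    (fun k => (k, entries.filter (fun e => pvKey e == k)))

-- ===== PRECONDITION & SPEC =====
def Spec_group_by_decision (entries : List (List (String × String))) (out : List (String × List (List (String × String)))) : Prop := out = group_by_decision_alt entries
instance (entries : List (List (String × String))) (out : List (String × List (List (String × String)))) : Decidable (Spec_group_by_decision entries out) := by unfold Spec_group_by_decision; infer_instance

-- ===== CLAIM (what is proved, stated in full; the proofs are below) =====
def Claim_equal_group_by_decision : Prop := ∀ (entries : List (List (String × String))), Dom_group_by_decision entries → Spec_group_by_decision entries (group_by_decision entries)

-- ===== LEMMAS AND PROOFS =====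

theorem pvFold_eq_pairs (entries : List (List (String × String))) :
    entries.foldl (fun g e => PySem.Dict.modify g (pvKey e) [] (fun v => v ++ [e])) PySem.Dict.empty
      = (entries.map (fun e => (pvKey e, e))).foldl
          (fun g p => PySem.Dict.modify g p.1 [] (fun v => v ++ [p.2])) PySem.Dict.empty := by
  rw [List.foldl_map]

theorem pvKeys_eq (entries : List (List (String × String))) :
    (entries.foldl (fun g e => PySem.Dict.modify g (pvKey e) [] (fun v => v ++ [e]))
        PySem.Dict.empty).keys
      = PySem.List.dedup (entries.map pvKey) := by
  rw [PySem.Dict.keys_foldl_modify_key]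
  simp [PySem.Set.update_nil_left]

theorem pvNodup_keys (entries : List (List (String × String))) :
    (entries.foldl (fun g e => PySem.Dict.modify g (pvKey e) [] (fun v => v ++ [e]))
        PySem.Dict.empty).keys.Nodup :=
  PySem.Dict.nodup_keys_foldl_modify_key entries pvKey [] (fun g e v => v ++ [e])
    PySem.Dict.empty (by simp [PySem.Dict.empty])

theorem pvGetD_eq (entries : List (List (String × String))) (k : String) :
    (entries.foldl (fun g e => PySem.Dict.modify g (pvKey e) [] (fun v => v ++ [e]))
        PySem.Dict.empty).getD k []
      = entries.filter (fun e => pvKey e == k) := by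
  rw [pvFold_eq_pairs, PySem.Dict.getD_foldl_modify_append]
  simp [List.filter_map, Function.comp_def]

-- ===== VERDICT (by name: the statement is the Claim_ definition above) =====
theorem group_by_decision_spec : Claim_equal_group_by_decision := by
  intro entries _
  show _ = _
  unfold group_by_decision group_by_decision_alt
  rw [PySem.Dict.items_eq_map_keys _ (pvNodup_keys entries) [], pvKeys_eq]
  exact List.map_congr_left (fun k _ => by rw [pvGetD_eq])
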